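-- pv_equiv track=rewrite | github.com/YuunqiLiu/uhdl | Component.py | __gen_aligned_signal_def
-- ===== SOURCE A (Python) =====
-- def __gen_aligned_signal_def(io_para_list):
--     max_prefix_length = 0
--     max_width_length = 0
--     max_name_length = 0
--     for i,j,k in io_para_list:
--         max_prefix_length = len(i) if len(i)>max_prefix_length else max_prefix_length
--         max_width_length = len(j) if len(j)>max_width_length else max_width_length
--         max_name_length = len(k) if len(k)>max_name_length else max_name_length
--
--     template_str = '%%-%ds %%-%ds %%-%ds'%(max_prefix_length,max_width_length,max_name_length)
--     return [template_str%(i,j,k) for i,j,k in io_para_list]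
-- ===== SOURCE B (Python) =====
-- def __gen_aligned_signal_def(io_para_list):
--     # Online re-justification: keep already-padded rows and current column
--     # widths; when a wider field arrives, widen every stored row in place.
--     widths = (0, 0, 0)
--     padded = []
--     for row in io_para_list:
--         widths = tuple(max(w, len(f)) for w, f in zip(widths, row))
--         padded = [tuple(f + ' ' * (w - len(f)) for f, w in zip(fs, widths))
--                   for fs in padded]
--         padded.append(tuple(f + ' ' * (w - len(f)) for f, w in zip(row, widths)))
--     return [' '.join(fs) for fs in padded]
-- ===== Notes on version B (the rewrite author's own statement) =====
-- stated objective: alternative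
-- what changed: Replaces A's two-phase precompute-maxima-then-format with a single online pass that keeps the rows already left-justified to the widths seen so far and re-widens all stored rows whenever a wider field arrives, joining the padded fields at the end.
import Mathlib
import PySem

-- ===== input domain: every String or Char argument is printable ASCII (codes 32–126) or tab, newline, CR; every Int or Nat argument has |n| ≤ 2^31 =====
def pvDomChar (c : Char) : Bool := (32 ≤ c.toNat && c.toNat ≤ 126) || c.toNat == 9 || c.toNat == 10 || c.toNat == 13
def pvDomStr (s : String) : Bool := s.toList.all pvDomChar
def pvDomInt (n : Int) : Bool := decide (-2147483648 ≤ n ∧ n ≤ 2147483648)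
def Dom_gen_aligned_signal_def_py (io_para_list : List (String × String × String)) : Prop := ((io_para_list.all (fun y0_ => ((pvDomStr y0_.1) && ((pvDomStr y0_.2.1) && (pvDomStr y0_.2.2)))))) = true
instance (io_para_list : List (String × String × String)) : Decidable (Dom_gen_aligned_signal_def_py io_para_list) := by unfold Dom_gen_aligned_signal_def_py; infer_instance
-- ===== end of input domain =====

-- B replaces A's two-phase precompute-then-format with an online pass that keeps
-- rows already padded to the widths seen so far, re-widening them as needed
-- (alternative decomposition, same results).

-- ===== PORT A =====
-- '%-<n>s' % s : left-justify s in a field of width n (exact for the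
-- nonnegative widths A produces).
def pvFmtLeft (n : Nat) (s : String) : String :=
  String.ofList (s.toList ++ List.replicate (n - s.toList.length) ' ')

def gen_aligned_signal_def_py (io_para_list : List (String × String × String)) : List String :=
  -- the for-loop updating the three running maxima
  let m := io_para_list.foldl
    (fun (acc : Nat × Nat × Nat) r =>
      (if r.1.toList.length > acc.1 then r.1.toList.length else acc.1,
       if r.2.1.toList.length > acc.2.1 then r.2.1.toList.length else acc.2.1,
       if r.2.2.toList.length > acc.2.2 then r.2.2.toList.length else acc.2.2))
    (0, 0, 0)
  -- template_str % (i,j,k)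
  io_para_list.map (fun r =>
    pvFmtLeft m.1 r.1 ++ " " ++ pvFmtLeft m.2.1 r.2.1 ++ " " ++ pvFmtLeft m.2.2 r.2.2)

-- ===== PORT B =====
-- f + ' ' * (w - len(f))
def pvPad (s : String) (w : Nat) : String :=
  s ++ String.ofList (List.replicate (w - s.toList.length) ' ')

def pvPadRow (w : Nat × Nat × Nat) (r : String × String × String) : String × String × String :=
  (pvPad r.1 w.1, pvPad r.2.1 w.2.1, pvPad r.2.2 w.2.2)

def gen_aligned_signal_def_py_alt (io_para_list : List (String × String × String)) : List String :=
  -- online pass: state = (current widths, rows padded to those widths)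
  let st := io_para_list.foldl
    (fun (st : (Nat × Nat × Nat) × List (String × String × String)) row =>
      let w := (Nat.max st.1.1 row.1.toList.length,
                Nat.max st.1.2.1 row.2.1.toList.length,
                Nat.max st.1.2.2 row.2.2.toList.length)
      (w, st.2.map (pvPadRow w) ++ [pvPadRow w row]))
    ((0, 0, 0), [])
  st.2.map (fun fs => PySem.Str.join " " [fs.1, fs.2.1, fs.2.2])

-- ===== PRECONDITION & SPEC =====
def Spec_gen_aligned_signal_def_py (io_para_list : List (String × String × String)) (out : List String) : Prop := out = gen_aligned_signal_def_py_alt io_para_list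
instance (io_para_list : List (String × String × String)) (out : List String) : Decidable (Spec_gen_aligned_signal_def_py io_para_list out) := by unfold Spec_gen_aligned_signal_def_py; infer_instance

-- ===== CLAIM (what is proved, stated in full; the proofs are below) =====
def Claim_equal_gen_aligned_signal_def_py : Prop := ∀ (io_para_list : List (String × String × String)), Dom_gen_aligned_signal_def_py io_para_list → Spec_gen_aligned_signal_def_py io_para_list (gen_aligned_signal_def_py io_para_list)

-- ===== LEMMAS AND PROOFS =====

theorem pvPad_toList (s : String) (w : Nat) :
    (pvPad s w).toList = s.toList ++ List.replicate (w - s.toList.length) ' ' := by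
  simp [pvPad]

-- padding an already-padded string to a wider width collapses
theorem pvPad_pvPad (s : String) {a b : Nat} (h : a ≤ b) :
    pvPad (pvPad s a) b = pvPad s b := by
  apply String.toList_injective
  simp only [pvPad_toList, List.length_append, List.length_replicate, List.append_assoc,
    List.append_cancel_left_eq]
  rw [← List.replicate_add]
  congr 1
  omega

theorem pvPadRow_pvPadRow (r : String × String × String) {a b : Nat × Nat × Nat}
    (h1 : a.1 ≤ b.1) (h2 : a.2.1 ≤ b.2.1) (h3 : a.2.2 ≤ b.2.2) :
    pvPadRow b (pvPadRow a r) = pvPadRow b r := by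
  simp [pvPadRow, pvPad_pvPad _ h1, pvPad_pvPad _ h2, pvPad_pvPad _ h3]

-- the fold step of B
def pvBStep (st : (Nat × Nat × Nat) × List (String × String × String))
    (row : String × String × String) : (Nat × Nat × Nat) × List (String × String × String) :=
  let w := (Nat.max st.1.1 row.1.toList.length,
            Nat.max st.1.2.1 row.2.1.toList.length,
            Nat.max st.1.2.2 row.2.2.toList.length)
  (w, st.2.map (pvPadRow w) ++ [pvPadRow w row])

def pvMaxFold (w0 : Nat × Nat × Nat) (l : List (String × String × String)) : Nat × Nat × Nat :=
  l.foldl (fun w r => (Nat.max w.1 r.1.toList.length,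
                       Nat.max w.2.1 r.2.1.toList.length,
                       Nat.max w.2.2 r.2.2.toList.length)) w0

-- invariant of B's online fold: the stored rows are the rows seen so far,
-- padded to the eventual (running-max) widths
theorem pvBFold_inv (l rows0 : List (String × String × String)) (w0 : Nat × Nat × Nat) :
    l.foldl pvBStep (w0, rows0.map (pvPadRow w0))
      = (pvMaxFold w0 l, (rows0 ++ l).map (pvPadRow (pvMaxFold w0 l))) := by
  induction l generalizing rows0 w0 with
  | nil => simp [pvMaxFold]
  | cons r t ih =>
      have hw : pvMaxFold w0 (r :: t)
          = pvMaxFold (Nat.max w0.1 r.1.toList.length,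
              Nat.max w0.2.1 r.2.1.toList.length,
              Nat.max w0.2.2 r.2.2.toList.length) t := rfl
      set w1 : Nat × Nat × Nat := (Nat.max w0.1 r.1.toList.length,
        Nat.max w0.2.1 r.2.1.toList.length, Nat.max w0.2.2 r.2.2.toList.length) with hw1
      have hstep : pvBStep (w0, rows0.map (pvPadRow w0)) r
          = (w1, (rows0 ++ [r]).map (pvPadRow w1)) := by
        simp only [pvBStep, hw1, List.map_append, List.map_map, List.map_cons, List.map_nil]
        congr 1
        congr 1
        apply List.map_congr_left
        intro x _
        exact pvPadRow_pvPadRow x (Nat.le_max_left _ _) (Nat.le_max_left _ _) (Nat.le_max_left _ _)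
      calc (r :: t).foldl pvBStep (w0, rows0.map (pvPadRow w0))
          = t.foldl pvBStep ((rows0 ++ [r]).map (pvPadRow w1)
              |> fun p => (w1, p)) := by rw [List.foldl_cons, hstep]
        _ = (pvMaxFold w1 t, ((rows0 ++ [r]) ++ t).map (pvPadRow (pvMaxFold w1 t))) := ih _ _
        _ = (pvMaxFold w0 (r :: t), (rows0 ++ r :: t).map (pvPadRow (pvMaxFold w0 (r :: t)))) := by
              rw [hw]; simp

-- A's triple if-fold is the componentwise max fold
theorem triple_fold_eq (l : List (String × String × String)) (w : Nat × Nat × Nat) :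
    l.foldl
      (fun (acc : Nat × Nat × Nat) r =>
        (if r.1.toList.length > acc.1 then r.1.toList.length else acc.1,
         if r.2.1.toList.length > acc.2.1 then r.2.1.toList.length else acc.2.1,
         if r.2.2.toList.length > acc.2.2 then r.2.2.toList.length else acc.2.2)) w
    = pvMaxFold w l := by
  induction l generalizing w with
  | nil => rfl
  | cons h t ih =>
      rw [List.foldl_cons, ih,
        show pvMaxFold w (h :: t)
          = pvMaxFold (Nat.max w.1 h.1.toList.length, Nat.max w.2.1 h.2.1.toList.length,
              Nat.max w.2.2 h.2.2.toList.length) t from rfl]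
      congr 1
      refine Prod.ext ?_ (Prod.ext ?_ ?_) <;>
        · simp only [Nat.max_def]; split_ifs <;> omega

theorem join3 (x y z : String) :
    PySem.Str.join " " [x, y, z] = x ++ " " ++ y ++ " " ++ z := by
  have h : PySem.Chars.join [' '] [x.toList, y.toList, z.toList]
      = (x ++ " " ++ y ++ " " ++ z).toList := by
    simp [PySem.Chars.join, List.intercalate]
  rw [show PySem.Str.join " " [x, y, z]
        = String.ofList (PySem.Chars.join [' '] [x.toList, y.toList, z.toList]) from rfl,
      h, String.ofList_toList]

theorem pvFmtLeft_eq_pvPad (n : Nat) (s : String) : pvFmtLeft n s = pvPad s n := by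
  apply String.toList_injective
  simp [pvFmtLeft, pvPad]

-- ===== VERDICT (by name: the statement is the Claim_ definition above) =====
theorem gen_aligned_signal_def_py_spec : Claim_equal_gen_aligned_signal_def_py := by
  intro l _
  unfold Spec_gen_aligned_signal_def_py gen_aligned_signal_def_py gen_aligned_signal_def_py_alt
  have hfold : l.foldl
      (fun (st : (Nat × Nat × Nat) × List (String × String × String)) row =>
        let w := (Nat.max st.1.1 row.1.toList.length,
                  Nat.max st.1.2.1 row.2.1.toList.length,
                  Nat.max st.1.2.2 row.2.2.toList.length)
        (w, st.2.map (pvPadRow w) ++ [pvPadRow w row])) ((0, 0, 0), [])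
      = (pvMaxFold (0, 0, 0) l, l.map (pvPadRow (pvMaxFold (0, 0, 0) l))) := by
    have := pvBFold_inv l [] (0, 0, 0)
    simpa [pvBStep] using this
  simp only [hfold, triple_fold_eq, List.map_map]
  apply List.map_congr_left
  intro r _
  simp [join3, pvPadRow, pvFmtLeft_eq_pvPad]
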